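-- pv_equiv track=rewrite | github.com/Plutonium8T8/Python3E3 | Lab2/Lab2.py | Ex9
-- ===== SOURCE A (Python) =====
-- def Ex9(matrix):
--     final_lst = set()
--     for i in range(len(matrix) - 1, -1, -1):
--         for j in range(0, len(matrix[0])):
--             for q in range(i-1,-1,-1):
--                 if matrix[i][j] <= matrix[q][j]:
--                     final_lst.add(tuple([i,j]))
--                     break
--     return final_lst
-- ===== SOURCE B (Python) =====
-- def Ex9(matrix):
--     res = set()
--     if len(matrix) <= 1:
--         return res
--     cols = len(matrix[0])
--     pm = [list(matrix[0])]
--     for row in matrix[1:]: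
--         pm.append(list(map(max, pm[-1], row)))
--     for i in range(len(matrix) - 1, 0, -1):
--         row = matrix[i]
--         prev = pm[i - 1]
--         for j in range(cols):
--             if row[j] <= prev[j]:
--                 res.add((i, j))
--     return res
-- ===== Notes on version B (the rewrite author's own statement) =====
-- stated objective: faster
-- what changed: replaced the per-cell backward scan of all rows above (triple loop) by a single top-down pass that maintains a per-column running maximum, then one comparison per cell
import Mathlib
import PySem

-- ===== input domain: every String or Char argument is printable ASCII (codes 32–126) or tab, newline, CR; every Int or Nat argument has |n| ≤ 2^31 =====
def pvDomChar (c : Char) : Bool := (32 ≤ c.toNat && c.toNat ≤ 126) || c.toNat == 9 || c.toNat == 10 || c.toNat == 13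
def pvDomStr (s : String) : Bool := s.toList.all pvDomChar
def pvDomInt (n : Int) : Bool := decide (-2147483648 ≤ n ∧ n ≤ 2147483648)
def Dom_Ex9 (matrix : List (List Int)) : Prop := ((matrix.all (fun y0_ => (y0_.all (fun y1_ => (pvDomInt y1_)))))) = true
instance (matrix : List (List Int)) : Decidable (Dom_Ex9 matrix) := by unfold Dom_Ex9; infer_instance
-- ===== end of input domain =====

-- B replaces A's per-cell backward scan of all rows above (O(R^2*C)) by one top-down
-- per-column running-maximum pass (O(R*C)); return value only, no argument is mutated.

-- ===== PORT A =====
-- for i in range(len(matrix)-1,-1,-1): for j in range(0,len(matrix[0])):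
--   inner q-loop with break = "if any q in range(i-1,-1,-1) satisfies, add (i,j) once"
def Ex9 (matrix : List (List Int)) : List (Int × Int) :=
  (PySem.List.pyRange ((matrix.length : Int) - 1) (-1) (-1)).foldl (fun s i =>
    (PySem.List.pyRange 0 ((matrix.headD []).length : Int) 1).foldl (fun s j =>
      if (PySem.List.pyRange (i - 1) (-1) (-1)).any (fun q =>
            decide (PySem.List.pyGetD (PySem.List.pyGetD matrix i []) j 0
                    ≤ PySem.List.pyGetD (PySem.List.pyGetD matrix q []) j 0))
      then PySem.Set.add s (i, j) else s) s)
    ([] : PySem.Set (Int × Int))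

-- ===== PORT B =====
-- pm = [row0]; pm.append(zip-max of pm[-1] with the next row)  (Source B's first loop)
def pvRunMax (prev : List Int) (rows : List (List Int)) : List (List Int) :=
  match rows with
  | [] => [prev]
  | r :: rs => prev :: pvRunMax (List.zipWith (fun a b => max a b) prev r) rs

def Ex9_alt (matrix : List (List Int)) : List (Int × Int) :=
  if matrix.length ≤ 1 then []
  else
    let cols : Int := ((matrix.headD []).length : Int)
    let pm := pvRunMax (matrix.headD []) matrix.tail
    (PySem.List.pyRange ((matrix.length : Int) - 1) 0 (-1)).foldl (fun s i =>
      let row := PySem.List.pyGetD matrix i []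
      let prev := PySem.List.pyGetD pm (i - 1) []
      (PySem.List.pyRange 0 cols 1).foldl (fun s j =>
        if PySem.List.pyGetD row j 0 ≤ PySem.List.pyGetD prev j 0
        then PySem.Set.add s (i, j) else s) s)
      ([] : PySem.Set (Int × Int))

-- ===== PRECONDITION & SPEC =====
-- Pre_ excludes only ragged inputs on which A raises IndexError: with at least two rows,
-- every row must be at least as long as row 0 (matrix[i][j] / matrix[q][j] for j < len(matrix[0])).
def Pre_Ex9 (matrix : List (List Int)) : Prop :=
  matrix.length ≤ 1 ∨ ∀ row ∈ matrix, (matrix.headD []).length ≤ row.length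
instance (matrix : List (List Int)) : Decidable (Pre_Ex9 matrix) := by unfold Pre_Ex9; infer_instance
def pvWitness_Ex9 : List (List Int) := [[1, 2], [3, 1], [0, 5]]

def Spec_Ex9 (matrix : List (List Int)) (out : List (Int × Int)) : Prop := out = Ex9_alt matrix
instance (matrix : List (List Int)) (out : List (Int × Int)) : Decidable (Spec_Ex9 matrix out) := by unfold Spec_Ex9; infer_instance

-- ===== CLAIM (what is proved, stated in full; the proofs are below) =====
def Claim_equal_Ex9 : Prop := ∀ (matrix : List (List Int)), Dom_Ex9 matrix → Pre_Ex9 matrix → Spec_Ex9 matrix (Ex9 matrix)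

-- ===== LEMMAS AND PROOFS =====

lemma pvRunMax_getD (rows : List (List Int)) (prev : List Int) (k : Nat) (hk : k ≤ rows.length) :
    (pvRunMax prev rows).getD k [] =
      (rows.take k).foldl (fun acc r => List.zipWith (fun a b => max a b) acc r) prev := by
  induction rows generalizing prev k with
  | nil =>
    simp only [List.length_nil, Nat.le_zero] at hk
    subst hk; rfl
  | cons r rs ih =>
    cases k with
    | zero => rfl
    | succ k =>
      simp only [pvRunMax, List.getD_cons_succ, List.take_succ_cons, List.foldl_cons]
      exact ih _ k (by simpa using hk)

lemma pvZipFold_getD (rows : List (List Int)) (prev : List Int) (j : Nat)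
    (hj : j < prev.length) (hlen : ∀ r ∈ rows, prev.length ≤ r.length) :
    (rows.foldl (fun acc r => List.zipWith (fun a b => max a b) acc r) prev).getD j 0
      = rows.foldl (fun acc r => max acc (r.getD j 0)) (prev.getD j 0) := by
  induction rows generalizing prev with
  | nil => rfl
  | cons r rs ih =>
    have hlr : prev.length ≤ r.length := hlen r (List.mem_cons_self ..)
    have hz : (List.zipWith (fun a b => max a b) prev r).length = prev.length := by
      rw [List.length_zipWith]; omega
    simp only [List.foldl_cons]
    rw [ih _ (by omega) (fun r' hr' => by rw [hz]; exact hlen r' (List.mem_cons_of_mem _ hr'))]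
    have hzj : (List.zipWith (fun a b => max a b) prev r).getD j 0
        = max (prev.getD j 0) (r.getD j 0) := by
      rw [List.getD_eq_getElem _ _ (by omega), List.getElem_zipWith,
        List.getD_eq_getElem _ _ hj, List.getD_eq_getElem _ _ (by omega)]
    rw [hzj]

lemma pvLeFoldMax_iff (rows : List (List Int)) (g : List Int → Int) (a init : Int) :
    (a ≤ rows.foldl (fun acc r => max acc (g r)) init) ↔
      (a ≤ init ∨ ∃ r ∈ rows, a ≤ g r) := by
  induction rows generalizing init with
  | nil => simp
  | cons r rs ih =>
    simp only [List.foldl_cons, ih, le_max_iff, List.mem_cons]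
    constructor
    · rintro (⟨h | h⟩ | ⟨r', hr', h⟩)
      · exact Or.inl h
      · exact Or.inr ⟨r, Or.inl rfl, h⟩
      · exact Or.inr ⟨r', Or.inr hr', h⟩
    · rintro (h | ⟨r', hr' | hr', h⟩)
      · exact Or.inl (Or.inl h)
      · subst hr'; exact Or.inl (Or.inr h)
      · exact Or.inr ⟨r', hr', h⟩

-- the crux: A's backward 'exists a row above with a ≥ value' equals B's 'value ≤ running max above'
lemma pvCond_iff (h0 : List Int) (tl : List (List Int))
    (hlen : ∀ r ∈ tl, h0.length ≤ r.length)
    (ni nj : Nat) (hi1 : 1 ≤ ni) (hi2 : ni ≤ tl.length) (hj : nj < h0.length) :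
    ((PySem.List.pyRange ((ni : Int) - 1) (-1) (-1)).any (fun q =>
        decide (PySem.List.pyGetD (PySem.List.pyGetD (h0 :: tl) (ni : Int) []) (nj : Int) 0
          ≤ PySem.List.pyGetD (PySem.List.pyGetD (h0 :: tl) q []) (nj : Int) 0)) = true
      ↔ PySem.List.pyGetD (PySem.List.pyGetD (h0 :: tl) (ni : Int) []) (nj : Int) 0
          ≤ PySem.List.pyGetD (PySem.List.pyGetD (pvRunMax h0 tl) ((ni : Int) - 1) []) (nj : Int) 0) := by
  have hcast : (ni : Int) - 1 = ((ni - 1 : Nat) : Int) := by omega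
  rw [hcast]
  simp only [PySem.List.pyGetD_natCast]
  rw [pvRunMax_getD tl h0 (ni - 1) (by omega)]
  rw [pvZipFold_getD _ h0 nj hj (fun r hr => hlen r (List.mem_of_mem_take hr))]
  rw [pvLeFoldMax_iff]
  rw [List.any_eq_true]
  set a := ((h0 :: tl).getD ni []).getD nj 0 with ha
  constructor
  · rintro ⟨q, hq, hle⟩
    rw [PySem.List.mem_pyRange_neg_one] at hq
    rw [decide_eq_true_eq] at hle
    have hq0 : 0 ≤ q := by omega
    obtain ⟨nq, rfl⟩ : ∃ nq : Nat, q = (nq : Int) := ⟨q.toNat, (Int.toNat_of_nonneg hq0).symm⟩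
    simp only [PySem.List.pyGetD_natCast] at hle
    cases nq with
    | zero => exact Or.inl (by simpa using hle)
    | succ t =>
      refine Or.inr ⟨tl.getD t [], ?_, by simpa using hle⟩
      have ht : t < ni - 1 := by omega
      have ht2 : t < tl.length := by omega
      rw [List.getD_eq_getElem _ _ ht2]
      rw [List.mem_take_iff_getElem]
      exact ⟨t, by omega, rfl⟩
  · rintro (h | ⟨r, hr, h⟩)
    · refine ⟨0, ?_, ?_⟩
      · rw [PySem.List.mem_pyRange_neg_one]; omega
      · rw [decide_eq_true_eq]
        simp only [PySem.List.pyGetD_zero]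
        simpa using h
    · rw [List.mem_take_iff_getElem] at hr
      obtain ⟨t, ht, rfl⟩ := hr
      refine ⟨((t + 1 : Nat) : Int), ?_, ?_⟩
      · rw [PySem.List.mem_pyRange_neg_one]; omega
      · rw [decide_eq_true_eq]
        simp only [PySem.List.pyGetD_natCast]
        simp only [List.getD_cons_succ]
        rwa [List.getD_eq_getElem _ _ (by omega : t < tl.length)]

-- range(n, -1, -1) = range(n, 0, -1) ++ [0] for 0 ≤ n
lemma pvRangeSplit (n : Int) (hn : 0 ≤ n) :
    PySem.List.pyRange n (-1) (-1) = PySem.List.pyRange n 0 (-1) ++ [0] := by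
  rw [PySem.List.pyRange_neg_one_eq_reverse, PySem.List.pyRange_neg_one_eq_reverse]
  have h01 : PySem.List.pyRange (-1 + 1) (n + 1) 1
      = PySem.List.pyRange 0 1 1 ++ PySem.List.pyRange 1 (n + 1) 1 := by
    norm_num
    rw [PySem.List.pyRange_one_append 0 1 (n + 1) (by norm_num) (by omega)]
  rw [h01, List.reverse_append]
  have : PySem.List.pyRange 0 1 1 = [0] := by decide
  norm_num [this]

-- the i = 0 iteration of A's outer loop adds nothing (no rows above)
lemma pvZeroStep (matrix : List (List Int)) (cols : Int) (s : PySem.Set (Int × Int)) :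
    (PySem.List.pyRange 0 cols 1).foldl (fun s j =>
      if (PySem.List.pyRange ((0 : Int) - 1) (-1) (-1)).any (fun q =>
            decide (PySem.List.pyGetD (PySem.List.pyGetD matrix 0 []) j 0
                    ≤ PySem.List.pyGetD (PySem.List.pyGetD matrix q []) j 0))
      then PySem.Set.add s ((0 : Int), j) else s) s = s := by
  have hnil : PySem.List.pyRange ((0 : Int) - 1) (-1) (-1) = [] :=
    PySem.List.pyRange_neg_one_eq_nil (by norm_num)
  simp only [hnil, List.any_nil, Bool.false_eq_true, if_false]
  exact List.foldl_fixed _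

-- ===== VERDICT (by name: the statement is the Claim_ definition above) =====
theorem Ex9_spec : Claim_equal_Ex9 := by
  intro matrix _ hpre
  unfold Spec_Ex9
  match matrix with
  | [] => rfl
  | [h0] =>
    show Ex9 [h0] = Ex9_alt [h0]
    unfold Ex9
    have h1 : ((([h0] : List (List Int)).length : Int) - 1) = 0 := by simp
    rw [h1, pvRangeSplit 0 le_rfl, PySem.List.pyRange_neg_one_eq_nil le_rfl]
    simp only [List.nil_append, List.foldl_cons, List.foldl_nil, List.headD_cons]
    rw [pvZeroStep]
    rfl
  | h0 :: h1 :: tl' =>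
    have hlen : ∀ r ∈ (h0 :: h1 :: tl'), h0.length ≤ r.length := by
      rcases hpre with h | h
      · exfalso; simp only [List.length_cons] at h; omega
      · simpa using h
    show Ex9 (h0 :: h1 :: tl') = Ex9_alt (h0 :: h1 :: tl')
    unfold Ex9 Ex9_alt
    rw [if_neg (by simp)]
    simp only [List.headD_cons, List.tail_cons]
    rw [pvRangeSplit _ (by simp; omega)]
    rw [List.foldl_append]
    simp only [List.foldl_cons, List.foldl_nil]
    rw [pvZeroStep]
    apply PySem.List.foldl_congr_mem'
    intro i hi s
    rw [PySem.List.mem_pyRange_neg_one] at hi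
    have hilen : ((h0 :: h1 :: tl').length : Int) = ((h1 :: tl').length : Int) + 1 := by
      simp only [List.length_cons]; push_cast; ring
    rw [hilen] at hi
    obtain ⟨ni, rfl⟩ : ∃ ni : Nat, i = (ni : Int) := ⟨i.toNat, (Int.toNat_of_nonneg (by omega)).symm⟩
    apply PySem.List.foldl_congr_mem'
    intro j hj s
    rw [PySem.List.mem_pyRange_one] at hj
    obtain ⟨nj, rfl⟩ : ∃ nj : Nat, j = (nj : Int) := ⟨j.toNat, (Int.toNat_of_nonneg (by omega)).symm⟩
    refine if_congr ?_ rfl rfl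
    rw [pvCond_iff h0 (h1 :: tl') (fun r hr => hlen r (List.mem_cons_of_mem _ hr)) ni nj
      (by omega) (by omega) (by exact_mod_cast hj.2)]
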